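-- pv_equiv track=rewrite | github.com/AlexanderNormann/Quizdatabase_final | models/document_operations.py | filter_rows_by_date
-- ===== SOURCE A (Python) =====
-- def filter_rows_by_date(rows, start_date, end_date):
--     filtered_rows = []
--
--     for row in rows:
--         row_last_used = row[4]
--         if start_date and end_date:
--             if start_date <= row_last_used <= end_date:
--                 filtered_rows.append(row)
--         elif start_date:
--             if start_date <= row_last_used:
--                 filtered_rows.append(row)
--         elif end_date:
--             if row_last_used <= end_date:
--                 filtered_rows.append(row)
--         else:
--             filtered_rows.append(row)
--
--     return filtered_rows
-- ===== SOURCE B (Python) =====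
-- def filter_rows_by_date(rows, start_date, end_date):
--     # Staged filtering: apply each bound as its own full pass, only if set.
--     kept = rows
--     if start_date:
--         kept = [row for row in kept if row[4] >= start_date]
--     if end_date:
--         kept = [row for row in kept if row[4] <= end_date]
--     return kept
-- ===== Notes on version B (the rewrite author's own statement) =====
-- stated objective: alternative
-- what changed: Replaces the single accumulator loop with a four-way case analysis per row by staged passes: each bound, when set, is applied as its own separate filtering pass over the list.
import Mathlib
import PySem

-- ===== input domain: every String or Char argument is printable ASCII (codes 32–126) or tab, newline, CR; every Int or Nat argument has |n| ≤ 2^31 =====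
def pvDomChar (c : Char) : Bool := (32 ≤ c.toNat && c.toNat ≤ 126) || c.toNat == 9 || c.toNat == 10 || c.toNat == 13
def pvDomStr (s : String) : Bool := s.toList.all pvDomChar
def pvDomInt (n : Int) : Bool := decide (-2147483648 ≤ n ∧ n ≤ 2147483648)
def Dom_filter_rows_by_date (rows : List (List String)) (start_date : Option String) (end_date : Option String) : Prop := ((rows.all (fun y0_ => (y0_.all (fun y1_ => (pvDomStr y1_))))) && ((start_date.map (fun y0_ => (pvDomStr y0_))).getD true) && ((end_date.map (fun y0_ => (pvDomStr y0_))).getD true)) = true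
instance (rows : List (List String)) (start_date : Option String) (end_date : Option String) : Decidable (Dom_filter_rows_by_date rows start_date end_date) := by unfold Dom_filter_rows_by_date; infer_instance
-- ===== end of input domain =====

-- B replaces A's single accumulator loop with a four-way per-row case analysis by
-- staged passes: each bound, when set, is applied as a separate filtering pass (objective: alternative).
set_option maxRecDepth 4000


-- Python truthiness of an optional string: None and "" are falsy
def pyTruthy (o : Option String) : Bool := o.getD "" ≠ ""

-- ===== PORT A =====
-- the loop: walk rows, appending to the accumulator per A's branch structure
def filterA_go (start_date end_date : Option String) :
    List (List String) → List (List String) → List (List String)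
  | acc, [] => acc
  | acc, row :: rest =>
      match PySem.List.pyGet? row 4 with
      | none => filterA_go start_date end_date acc rest   -- IndexError in Python (outside Pre_)
      | some row_last_used =>
          let acc' :=
            if pyTruthy start_date && pyTruthy end_date then
              if start_date.getD "" ≤ row_last_used ∧ row_last_used ≤ end_date.getD "" then acc ++ [row] else acc
            else if pyTruthy start_date then
              if start_date.getD "" ≤ row_last_used then acc ++ [row] else acc
            else if pyTruthy end_date then
              if row_last_used ≤ end_date.getD "" then acc ++ [row] else acc
            else acc ++ [row]
          filterA_go start_date end_date acc' rest

def filter_rows_by_date (rows : List (List String)) (start_date : Option String) (end_date : Option String) : List (List String) :=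
  filterA_go start_date end_date [] rows

-- ===== PORT B =====
-- B: staged passes — one filtering pass per bound, each applied only when that bound is truthy
def filter_rows_by_date_alt (rows : List (List String)) (start_date : Option String) (end_date : Option String) : List (List String) :=
  let kept :=
    if pyTruthy start_date then
      rows.filter (fun row =>
        match PySem.List.pyGet? row 4 with
        | none => false   -- IndexError in Python (outside Pre_)
        | some d => decide (start_date.getD "" ≤ d))
    else rows
  let kept2 :=
    if pyTruthy end_date then
      kept.filter (fun row =>
        match PySem.List.pyGet? row 4 with
        | none => false   -- IndexError in Python (outside Pre_)
        | some d => decide (d ≤ end_date.getD ""))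
    else kept
  kept2

-- ===== PRECONDITION & SPEC =====
-- Pre_ excludes rows with fewer than 5 columns, on which A raises IndexError
def Pre_filter_rows_by_date (rows : List (List String)) (start_date : Option String) (end_date : Option String) : Prop :=
  ∀ row ∈ rows, 5 ≤ row.length
instance (rows : List (List String)) (start_date : Option String) (end_date : Option String) : Decidable (Pre_filter_rows_by_date rows start_date end_date) := by unfold Pre_filter_rows_by_date; infer_instance
def pvWitness_filter_rows_by_date : List (List String) × Option String × Option String :=
  ([["a", "b", "c", "d", "2020"], ["a", "b", "c", "d", "2018"]], some "2019", none)

def Spec_filter_rows_by_date (rows : List (List String)) (start_date : Option String) (end_date : Option String) (out : List (List String)) : Prop := out = filter_rows_by_date_alt rows start_date end_date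
instance (rows : List (List String)) (start_date : Option String) (end_date : Option String) (out : List (List String)) : Decidable (Spec_filter_rows_by_date rows start_date end_date out) := by unfold Spec_filter_rows_by_date; infer_instance

-- ===== CLAIM (what is proved, stated in full; the proofs are below) =====
def Claim_equal_filter_rows_by_date : Prop := ∀ (rows : List (List String)) (start_date : Option String) (end_date : Option String), Dom_filter_rows_by_date rows start_date end_date → Pre_filter_rows_by_date rows start_date end_date → Spec_filter_rows_by_date rows start_date end_date (filter_rows_by_date rows start_date end_date)
-- ===== LEMMAS AND PROOFS =====

-- A's per-row keep decision, as a boolean predicate (proof helper)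
def keepA (sd ed : Option String) (row : List String) : Bool :=
  match PySem.List.pyGet? row 4 with
  | none => false
  | some d =>
      if pyTruthy sd && pyTruthy ed then decide (sd.getD "" ≤ d ∧ d ≤ ed.getD "")
      else if pyTruthy sd then decide (sd.getD "" ≤ d)
      else if pyTruthy ed then decide (d ≤ ed.getD "")
      else true

lemma filterA_go_eq (sd ed : Option String) (rows acc : List (List String)) :
    filterA_go sd ed acc rows = acc ++ rows.filter (keepA sd ed) := by
  induction rows generalizing acc with
  | nil => simp [filterA_go]
  | cons row rest ih =>
    rw [filterA_go]
    cases hg : PySem.List.pyGet? row 4 with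
    | none => simp [ih, keepA, hg]
    | some d =>
      simp only [List.filter_cons, keepA, hg]
      by_cases hs : pyTruthy sd <;> by_cases he : pyTruthy ed <;>
        simp only [hs, he, Bool.and_self, Bool.and_false, Bool.false_and, Bool.true_and,
          if_true, Bool.false_eq_true, if_false]
      · by_cases h1 : sd.getD "" ≤ d ∧ d ≤ ed.getD ""
        · rw [if_pos h1, ih, if_pos (by simp only [decide_eq_true_eq]; exact h1)]; simp
        · rw [if_neg h1, ih, if_neg (by simp only [decide_eq_true_eq]; exact h1)]
      · by_cases h1 : sd.getD "" ≤ d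
        · rw [if_pos h1, ih, if_pos (by simp only [decide_eq_true_eq]; exact h1)]; simp
        · rw [if_neg h1, ih, if_neg (by simp only [decide_eq_true_eq]; exact h1)]
      · by_cases h1 : d ≤ ed.getD ""
        · rw [if_pos h1, ih, if_pos (by simp only [decide_eq_true_eq]; exact h1)]; simp
        · rw [if_neg h1, ih, if_neg (by simp only [decide_eq_true_eq]; exact h1)]
      · rw [ih]; simp

lemma pyGet4_some (row : List String) (h : 5 ≤ row.length) :
    ∃ d, PySem.List.pyGet? row 4 = some d := by
  refine ⟨row[4]'(by omega), ?_⟩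
  exact PySem.List.pyGet?_ofNat row 4 (by omega)

-- ===== VERDICT (by name: the statement is the Claim_ definition above) =====
theorem filter_rows_by_date_spec : Claim_equal_filter_rows_by_date := by
  intro rows sd ed _ hpre
  unfold Spec_filter_rows_by_date filter_rows_by_date filter_rows_by_date_alt
  rw [filterA_go_eq]
  simp only [List.nil_append]
  by_cases hs : pyTruthy sd <;> by_cases he : pyTruthy ed <;>
    simp only [hs, he, if_true, if_false]
  · -- both bounds: composed staged filters
    rw [List.filter_filter]
    refine (List.filter_congr ?_).symm
    intro row hrow
    obtain ⟨d, hg⟩ := pyGet4_some row (hpre row hrow)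
    simp [keepA, hg, hs, he, Bool.and_comm]
  · -- start bound only
    refine (List.filter_congr ?_).symm
    intro row hrow
    obtain ⟨d, hg⟩ := pyGet4_some row (hpre row hrow)
    simp [keepA, hg, hs, he]
  · -- end bound only
    refine (List.filter_congr ?_).symm
    intro row hrow
    obtain ⟨d, hg⟩ := pyGet4_some row (hpre row hrow)
    simp [keepA, hg, hs, he]
  · -- no bounds: A's filter keeps everything
    refine List.filter_eq_self.mpr ?_
    intro row hrow
    obtain ⟨d, hg⟩ := pyGet4_some row (hpre row hrow)
    simp [keepA, hg, hs, he]
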